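-- pv_equiv track=rewrite | github.com/Eeeeelias/SeMSe | server/semse_api/views.py | combine_show_with_season
-- ===== SOURCE A (Python) =====
-- def combine_show_with_season(tuple_list):
--     available_seasons = {}
--     for show in tuple_list:
--         name = show[0]
--         try:
--             # split episode_id from s01e01 to just 1
--             season = int(show[1].upper().split("E")[0][1:])
--         except ValueError:
--             season = None
--         available_seasons[name] = available_seasons.get(name, []) + [season]
--     return available_seasons
-- ===== SOURCE B (Python) =====
-- def combine_show_with_season(tuple_list):
--     def parse(episode_id):
--         try:
--             return int(episode_id.upper().split("E")[0][1:])
--         except ValueError: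
--             return None
--     names = dict.fromkeys(name for name, _ in tuple_list)
--     return {name: [parse(ep) for n, ep in tuple_list if n == name]
--             for name in names}
-- ===== Notes on version B (the rewrite author's own statement) =====
-- stated objective: idiomatic
-- what changed: B replaces A's incremental dict-of-lists accumulation with a dict.fromkeys first-occurrence name list and a per-name filter comprehension that collects each show's parsed seasons in one dict comprehension.
import Mathlib
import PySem

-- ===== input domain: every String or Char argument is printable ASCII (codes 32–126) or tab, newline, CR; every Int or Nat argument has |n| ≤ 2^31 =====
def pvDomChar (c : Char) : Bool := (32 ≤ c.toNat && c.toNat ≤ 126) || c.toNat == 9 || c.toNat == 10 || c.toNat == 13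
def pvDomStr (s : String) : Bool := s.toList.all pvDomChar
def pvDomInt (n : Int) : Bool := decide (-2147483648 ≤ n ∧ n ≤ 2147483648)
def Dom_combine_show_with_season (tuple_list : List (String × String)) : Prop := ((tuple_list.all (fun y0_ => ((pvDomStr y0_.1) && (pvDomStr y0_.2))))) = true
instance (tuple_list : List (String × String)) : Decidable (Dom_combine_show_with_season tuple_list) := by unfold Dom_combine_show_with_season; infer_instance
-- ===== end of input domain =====

-- B builds the first-occurrence name list once (dict.fromkeys) and collects each
-- name's parsed seasons by filtering, instead of A's incremental dict updates
-- (objective: idiomatic; no speed claim).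

-- shared parse helper: int(episode_id.upper().split("E")[0][1:]), ValueError -> none
def pvSeason (episode_id : String) : Option Int :=
  PySem.Int.ofStr?
    (PySem.Str.slice (((PySem.Str.split? (PySem.Str.upper episode_id) "E").getD []).headD "") (some 1) none)

-- ===== PORT A =====
def combine_show_with_season (tuple_list : List (String × String)) : List (String × List (Option Int)) :=
  (tuple_list.foldl
    (fun d s =>
      d.insert s.1 (d.getD s.1 [] ++ [pvSeason s.2]))
    PySem.Dict.empty).items

-- ===== PORT B =====
def combine_show_with_season_alt (tuple_list : List (String × String)) : List (String × List (Option Int)) :=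
  (PySem.List.dedup (tuple_list.map (·.1))).map
    (fun name => (name, (tuple_list.filter (fun p => p.1 == name)).map (fun p => pvSeason p.2)))

-- ===== PRECONDITION & SPEC =====
def Spec_combine_show_with_season (tuple_list : List (String × String)) (out : List (String × List (Option Int))) : Prop := out = combine_show_with_season_alt tuple_list
instance (tuple_list : List (String × String)) (out : List (String × List (Option Int))) : Decidable (Spec_combine_show_with_season tuple_list out) := by unfold Spec_combine_show_with_season; infer_instance

-- ===== CLAIM (what is proved, stated in full; the proofs are below) =====
def Claim_equal_combine_show_with_season : Prop := ∀ (tuple_list : List (String × String)), Dom_combine_show_with_season tuple_list → Spec_combine_show_with_season tuple_list (combine_show_with_season tuple_list)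

-- ===== LEMMAS AND PROOFS =====

-- the accumulated seasons list for each key, by induction over A's loop
lemma pv_getD (tl : List (String × String)) (d : PySem.Dict String (List (Option Int))) (c : String) :
    (tl.foldl (fun d s => d.insert s.1 (d.getD s.1 [] ++ [pvSeason s.2])) d).getD c []
      = d.getD c [] ++ (tl.filter (fun p => p.1 == c)).map (fun p => pvSeason p.2) := by
  induction tl generalizing d with
  | nil => simp
  | cons p rest ih =>
    simp only [List.foldl_cons, ih, List.filter_cons]
    by_cases h : p.1 = c
    · subst h
      simp [PySem.Dict.getD_insert_self]
    · have hb : (p.1 == c) = false := by simp [h]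
      rw [PySem.Dict.getD_insert_of_ne d _ _ (Ne.symm h), hb]
      simp

-- ===== VERDICT (by name: the statement is the Claim_ definition above) =====
theorem combine_show_with_season_spec : Claim_equal_combine_show_with_season := by
  intro tl _
  unfold Spec_combine_show_with_season combine_show_with_season combine_show_with_season_alt
  have hnd := PySem.Dict.nodup_keys_foldl_insert_key tl Prod.fst
      (fun d s => d.getD s.1 [] ++ [pvSeason s.2]) PySem.Dict.empty (by simp)
  rw [PySem.Dict.items_eq_map_keys _ hnd []]
  rw [PySem.Dict.keys_foldl_insert_key tl Prod.fst
      (fun d s => d.getD s.1 [] ++ [pvSeason s.2])]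
  simp only [PySem.Dict.keys_empty, PySem.Set.update_nil_left, PySem.List.dedup_eq_ofList]
  apply List.map_congr_left
  intro k hk
  rw [pv_getD]
  simp
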